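-- pv_equiv track=rewrite | github.com/Glueymetal/Cryptography_CIA | cia.py | djb2
-- ===== SOURCE A (Python) =====
-- def djb2(text):
--     h = 5381
--     magic_multiplier = 33
--     hash_digest = ""
--     for c in text:
--         h = h * magic_multiplier + ord(c)
--     for n in str(h):
--         hash_digest = hash_digest + chr(int(n) + ord('A'))
--     return hash_digest
-- ===== SOURCE B (Python) =====
-- _TABLE = str.maketrans('0123456789', 'ABCDEFGHIJ')
--
-- def djb2(text):
--     # right-to-left accumulation with a running power of 33:
--     # h = 5381*33^n + sum ord(c_i)*33^(n-1-i)
--     p, acc = 1, 0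
--     for c in reversed(text):
--         acc += ord(c) * p
--         p *= 33
--     return str(5381 * p + acc).translate(_TABLE)
-- ===== Notes on version B (the rewrite author's own statement) =====
-- stated objective: alternative
-- what changed: B replaces A's left-to-right Horner accumulation by a right-to-left pass with a running power of 33 (h = 5381*33^n + sum of ord(c)*33^(n-1-i)), and replaces the character-by-character digit-to-letter concatenation loop by a precomputed str.maketrans translation table applied with str.translate in one pass.
import Mathlib
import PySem

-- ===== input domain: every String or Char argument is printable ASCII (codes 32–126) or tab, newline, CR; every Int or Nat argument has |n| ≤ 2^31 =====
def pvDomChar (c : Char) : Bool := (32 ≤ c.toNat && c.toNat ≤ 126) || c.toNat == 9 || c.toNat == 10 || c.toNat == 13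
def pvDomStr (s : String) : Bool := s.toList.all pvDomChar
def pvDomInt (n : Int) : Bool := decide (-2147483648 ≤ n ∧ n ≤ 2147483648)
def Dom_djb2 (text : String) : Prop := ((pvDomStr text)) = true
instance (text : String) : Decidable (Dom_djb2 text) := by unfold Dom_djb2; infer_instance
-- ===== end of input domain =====

-- B computes the hash by a right-to-left pass with a running power of 33 and encodes the
-- digits through a precomputed translation table, instead of A's Horner loop and char-append loop.

-- ===== PORT A =====
def djb2 (text : String) : String :=
  let magic_multiplier : Int := 33
  let h : Int := text.toList.foldl (fun h c => h * magic_multiplier + (c.toNat : Int)) 5381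
  -- int(n) on a single char of str(h): PySem.Int.ofChars?; h > 0 so it is always a digit
  -- and ofChars? never returns none (the .getD 0 default is never used).
  String.mk ((PySem.Int.toChars h).foldl
    (fun acc n => acc ++ [Char.ofNat (((PySem.Int.ofChars? [n]).getD 0).toNat + 65)]) [])

-- ===== PORT B =====
-- str.maketrans('0123456789', 'ABCDEFGHIJ') as an association table
def djb2Table : List (Char × Char) :=
  List.zip ['0','1','2','3','4','5','6','7','8','9'] ['A','B','C','D','E','F','G','H','I','J']

def djb2_alt (text : String) : String :=
  -- reversed(text) pass with running power p and accumulator acc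
  let pa := text.toList.reverse.foldl
    (fun (st : Int × Int) c => (st.1 * 33, st.2 + (c.toNat : Int) * st.1)) (1, 0)
  let h : Int := 5381 * pa.1 + pa.2
  -- str.translate: map each char through the table, chars without an entry pass through
  String.mk ((PySem.Int.toChars h).map (fun c => (djb2Table.lookup c).getD c))

-- ===== PRECONDITION & SPEC =====
def Spec_djb2 (text : String) (out : String) : Prop := out = djb2_alt text
instance (text : String) (out : String) : Decidable (Spec_djb2 text out) := by unfold Spec_djb2; infer_instance

-- ===== CLAIM (what is proved, stated in full; the proofs are below) =====
def Claim_equal_djb2 : Prop := ∀ (text : String), Dom_djb2 text → Spec_djb2 text (djb2 text)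

-- ===== LEMMAS AND PROOFS =====

lemma djb2_foldl_rev (cs : List Char) (h0 : Int) :
    cs.foldl (fun h c => h * 33 + (c.toNat : Int)) h0
      = h0 * (cs.reverse.foldl
          (fun (st : Int × Int) c => (st.1 * 33, st.2 + (c.toNat : Int) * st.1)) (1, 0)).1
        + (cs.reverse.foldl
          (fun (st : Int × Int) c => (st.1 * 33, st.2 + (c.toNat : Int) * st.1)) (1, 0)).2 := by
  induction cs generalizing h0 with
  | nil => simp
  | cons c t ih =>
    simp only [List.foldl_cons, List.reverse_cons, List.foldl_append, List.foldl_cons,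
      List.foldl_nil, ih]
    ring

lemma djb2_rev_nonneg (ds : List Char) (st : Int × Int) (h1 : 0 ≤ st.1) (h2 : 0 ≤ st.2) :
    0 ≤ (ds.foldl (fun (st : Int × Int) c => (st.1 * 33, st.2 + (c.toNat : Int) * st.1)) st).1
    ∧ 0 ≤ (ds.foldl (fun (st : Int × Int) c => (st.1 * 33, st.2 + (c.toNat : Int) * st.1)) st).2 := by
  induction ds generalizing st with
  | nil => exact ⟨h1, h2⟩
  | cons c t ih =>
    exact ih _ (by positivity) (by positivity)

def djb2Digits : List Char := ['0','1','2','3','4','5','6','7','8','9']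

lemma djb2_digitChar_mem (m : Nat) (hm : m < 10) : m.digitChar ∈ djb2Digits := by
  interval_cases m <;> decide

lemma djb2_toDigitsCore_mem (fuel n : Nat) (ds : List Char) (hds : ∀ c ∈ ds, c ∈ djb2Digits) :
    ∀ c ∈ Nat.toDigitsCore 10 fuel n ds, c ∈ djb2Digits := by
  induction fuel generalizing n ds with
  | zero => simpa [Nat.toDigitsCore] using hds
  | succ fuel ih =>
    simp only [Nat.toDigitsCore]
    split
    · intro c hc
      rcases List.mem_cons.mp hc with hx | hx
      · exact hx ▸ djb2_digitChar_mem _ (Nat.mod_lt _ (by norm_num))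
      · exact hds _ hx
    · exact ih _ _ (by
        intro c hc
        rcases List.mem_cons.mp hc with hx | hx
        · exact hx ▸ djb2_digitChar_mem _ (Nat.mod_lt _ (by norm_num))
        · exact hds _ hx)

lemma djb2_toChars_mem (h : Int) (hh : 0 ≤ h) : ∀ c ∈ PySem.Int.toChars h, c ∈ djb2Digits := by
  simp only [PySem.Int.toChars, if_neg (not_lt.mpr hh)]
  exact djb2_toDigitsCore_mem _ _ [] (by simp)

lemma djb2_enc_eq (c : Char) (hc : c ∈ djb2Digits) :
    Char.ofNat (((PySem.Int.ofChars? [c]).getD 0).toNat + 65) = (djb2Table.lookup c).getD c := by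
  fin_cases hc <;> decide

-- ===== VERDICT (by name: the statement is the Claim_ definition above) =====
theorem djb2_spec : Claim_equal_djb2 := by
  intro text _
  unfold Spec_djb2 djb2 djb2_alt
  simp only []
  rw [djb2_foldl_rev, PySem.List.foldl_append_singleton_eq_map]
  simp only [List.nil_append]
  have hnn := djb2_rev_nonneg text.toList.reverse (1, 0) (by norm_num) (by norm_num)
  have hpos : (0:Int) ≤ 5381 * (text.toList.reverse.foldl
      (fun (st : Int × Int) c => (st.1 * 33, st.2 + (c.toNat : Int) * st.1)) (1, 0)).1
      + (text.toList.reverse.foldl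
      (fun (st : Int × Int) c => (st.1 * 33, st.2 + (c.toNat : Int) * st.1)) (1, 0)).2 :=
    add_nonneg (by nlinarith [hnn.1]) hnn.2
  congr 1
  exact List.map_congr_left (fun c hc => djb2_enc_eq c (djb2_toChars_mem _ hpos c hc))
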